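-- pv_equiv track=rewrite | github.com/doakey3/Subsimport | split_words.py | paragraphDivider
-- ===== SOURCE A (Python) =====
-- def fillWordSpace(word):
--     """Replaces all characters in a word with space"""
--     growing_space = ''
--     for char in word:
--         growing_space += ' '
--     return growing_space
--
-- def makePaddedParagraph(position, words_list):
--     """Makes a padded paragraph"""
--     words = []
--     for i in range(len(words_list)):
--         words.append(list(words_list[i]))
--
--     for x in range(len(words)):
--         for y in range(len(words[x])):
--             if not [x, y] == position:
--                 words[x][y] = fillWordSpace(words[x][y])
--
--     for i in range(len(words)):
--         words[i] = ' '.join(words[i])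
--     return '\n'.join(words)
--
-- def paragraphDivider(text):
--     """
--     split each word in text, then pad it with spaces/newlines so
--     the word appears in the same spot (in a monospace font)
--     """
--     words = []
--     lines = text.split('\n')
--
--     for i in range(len(lines)):
--         words.append([])
--         split = lines[i].split(' ')
--         for word in split:
--             words[i].append(word)
--
--     padded_paragraphs = []
--     for x in range(len(words)):
--         for y in range(len(words[x])):
--
--             pp = makePaddedParagraph([x, y], words)
--             padded_paragraphs.append(pp)
--     return padded_paragraphs
-- ===== SOURCE B (Python) =====
-- def paragraphDivider(text):
--     """
--     split each word in text, then pad it with spaces/newlines so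
--     the word appears in the same spot (in a monospace font)
--     """
--     lines = [line.split(' ') for line in text.split('\n')]
--     blanks = [[' ' * len(w) for w in line] for line in lines]
--     blank_lines = [' '.join(b) for b in blanks]
--     out = []
--     for x, line in enumerate(lines):
--         bx = blanks[x]
--         for y, w in enumerate(line):
--             row = ' '.join(bx[:y] + [w] + bx[y + 1:])
--             out.append('\n'.join(blank_lines[:x] + [row] + blank_lines[x + 1:]))
--     return out
-- ===== Notes on version B (the rewrite author's own statement) =====
-- stated objective: simpler
-- what changed: B precomputes the blank (space-filled) word lists and the fully-blanked line strings once, then assembles each output paragraph by splicing the single real word into slot y of line x of that fixed template, instead of A's recopying and re-blanking the entire list-of-lists via makePaddedParagraph for every (x,y) position.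
import Mathlib
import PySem

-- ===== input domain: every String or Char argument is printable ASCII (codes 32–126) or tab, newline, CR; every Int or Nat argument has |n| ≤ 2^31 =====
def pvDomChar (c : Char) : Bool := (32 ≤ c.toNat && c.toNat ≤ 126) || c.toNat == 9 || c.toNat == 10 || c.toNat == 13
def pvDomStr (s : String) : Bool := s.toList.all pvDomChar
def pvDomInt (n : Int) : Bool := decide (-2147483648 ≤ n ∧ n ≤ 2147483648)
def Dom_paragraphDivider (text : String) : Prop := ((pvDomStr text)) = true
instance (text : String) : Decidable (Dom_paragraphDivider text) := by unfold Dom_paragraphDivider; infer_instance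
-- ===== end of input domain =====

-- B precomputes the blanked-line template once and substitutes one word per position,
-- instead of A's rebuilding and re-blanking the whole list-of-lists for every position (objective: simpler).

-- ===== PORT A =====
-- 'growing_space += " "' is ported on the character list (Lean's own String.append is
-- kernel-opaque); appending one space to the accumulator per character is exact.
def fillWordSpace (word : String) : String :=
  String.ofList (word.toList.foldl (fun gs _ => gs ++ [' ']) [])

def makePaddedParagraph (position : List Int) (wordsList : List (List String)) : String :=
  let words := wordsList.mapIdx (fun x line =>
    line.mapIdx (fun y w => if ¬ ([(x : Int), (y : Int)] = position) then fillWordSpace w else w))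
  PySem.Str.join "\n" (words.map (fun line => PySem.Str.join " " line))

def paragraphDivider (text : String) : List String :=
  let lines := (PySem.Str.split? text "\n").getD []
  let words := lines.foldl (fun acc line => acc ++ [(PySem.Str.split? line " ").getD []]) []
  (PySem.List.pyRange 0 (PySem.List.len words) 1).foldl (fun acc x =>
    (PySem.List.pyRange 0 (PySem.List.len (PySem.List.pyGetD words x [])) 1).foldl
      (fun acc2 y => acc2 ++ [makePaddedParagraph [x, y] words]) acc) []

-- ===== PORT B =====
-- "' ' * len(w)": a length-of-w run of spaces; exact.
def blankWord (w : String) : String := String.ofList (List.replicate w.toList.length ' ')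

def paragraphDivider_alt (text : String) : List String :=
  let lines := ((PySem.Str.split? text "\n").getD []).map (fun l => (PySem.Str.split? l " ").getD [])
  let blanks := lines.map (fun line => line.map blankWord)
  let blankLines := blanks.map (fun b => PySem.Str.join " " b)
  (PySem.List.enumerate lines).foldl (fun out p =>
    let bx := PySem.List.pyGetD blanks p.1 []
    (PySem.List.enumerate p.2).foldl (fun out2 q =>
      let row := PySem.Str.join " "
        (PySem.List.slice bx none (some q.1) ++ [q.2] ++ PySem.List.slice bx (some (q.1 + 1)) none)
      out2 ++ [PySem.Str.join "\n"
        (PySem.List.slice blankLines none (some p.1) ++ [row] ++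
         PySem.List.slice blankLines (some (p.1 + 1)) none)]) out) []

-- ===== PRECONDITION & SPEC =====
def Spec_paragraphDivider (text : String) (out : List String) : Prop := out = paragraphDivider_alt text
instance (text : String) (out : List String) : Decidable (Spec_paragraphDivider text out) := by unfold Spec_paragraphDivider; infer_instance

-- ===== CLAIM (what is proved, stated in full; the proofs are below) =====
def Claim_equal_paragraphDivider : Prop := ∀ (text : String), Dom_paragraphDivider text → Spec_paragraphDivider text (paragraphDivider text)

-- ===== LEMMAS AND PROOFS =====

lemma pyRange_zero_nat (n : Nat) :
    PySem.List.pyRange 0 (n : Int) 1 = (List.range n).map (fun (k : Nat) => (k : Int)) := by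
  induction n with
  | zero => decide
  | succ m ih =>
    have h : ((m + 1 : Nat) : Int) = (m : Int) + 1 := by push_cast; ring
    rw [h, PySem.List.pyRange_one_append 0 m ((m : Int) + 1) (by omega) (by omega), ih,
      List.range_succ, PySem.List.pyRange_one_cons (by omega)]
    simp [PySem.List.pyRange]

lemma fill_aux : ∀ (cs acc : List Char),
    cs.foldl (fun gs _ => gs ++ [' ']) acc = acc ++ List.replicate cs.length ' ' := by
  intro cs
  induction cs with
  | nil => simp
  | cons c t ih =>
    intro acc
    simp only [List.foldl_cons, ih, List.append_assoc]
    rw [show [' '] ++ List.replicate t.length ' ' = List.replicate (t.length + 1) ' ' from by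
      simp [List.replicate_succ], show (c :: t).length = t.length + 1 from rfl]

lemma fillWordSpace_eq_blankWord : fillWordSpace = blankWord := by
  funext w
  unfold fillWordSpace blankWord
  rw [fill_aux]
  simp

lemma mapIdx_const {α β : Type} (g : α → β) (l : List α) :
    l.mapIdx (fun _ a => g a) = l.map g := by
  induction l with
  | nil => rfl
  | cons a t ih => simp [List.mapIdx_cons, ih]

lemma mapIdx_point {α β : Type} (f g : α → β) (d : α) (l : List α) (k : Nat) (hk : k < l.length) :
    l.mapIdx (fun i a => if i = k then f a else g a) =
      (l.map g).take k ++ [f (l.getD k d)] ++ (l.map g).drop (k + 1) := by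
  induction l generalizing k with
  | nil => simp at hk
  | cons a t ih =>
    cases k with
    | zero => simp [List.mapIdx_cons, mapIdx_const]
    | succ m =>
      have hfun : (fun (i : Nat) (a : α) => if i + 1 = m + 1 then f a else g a) =
          (fun (i : Nat) (a : α) => if i = m then f a else g a) := by
        funext i a; simp
      simp only [List.mapIdx_cons, hfun, ih m (by simpa using hk)]
      simp

lemma point_eq (L : List (List String)) (k j : Nat) (hk : k < L.length)
    (hj : j < (L.getD k []).length) :
    makePaddedParagraph [(k : Int), (j : Int)] L =
      PySem.Str.join "\n"
        ((L.map (fun line => PySem.Str.join " " (line.map blankWord))).take k ++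
          [PySem.Str.join " " (((L.getD k []).map blankWord).take j ++
            [(L.getD k []).getD j ""] ++ ((L.getD k []).map blankWord).drop (j + 1))] ++
          (L.map (fun line => PySem.Str.join " " (line.map blankWord))).drop (k + 1)) := by
  unfold makePaddedParagraph
  have houter : (fun (x : Nat) (line : List String) =>
      line.mapIdx (fun y w => if ¬ ([(x : Int), (y : Int)] = [(k : Int), (j : Int)]) then fillWordSpace w else w)) =
      (fun (x : Nat) (line : List String) => if x = k then
        line.mapIdx (fun y w => if y = j then w else fillWordSpace w)
      else line.map fillWordSpace) := by
    funext x line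
    by_cases h : x = k
    · subst h
      simp only
      congr 1
      funext y w
      by_cases hy : y = j <;> simp [hy]
    · simp only [if_neg h]
      rw [show (fun (y : Nat) (w : String) =>
          if ¬ ([(x : Int), (y : Int)] = [(k : Int), (j : Int)]) then fillWordSpace w else w) =
          (fun (_ : Nat) (w : String) => fillWordSpace w) from by
        funext y w; simp [h]]
      exact mapIdx_const _ _
  simp only []
  rw [houter, mapIdx_point _ _ [] L k hk,
    mapIdx_point (fun (w : String) => w) fillWordSpace "" (L.getD k []) j hj]
  simp [fillWordSpace_eq_blankWord, List.map_take, List.map_drop, List.map_map, Function.comp_def]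

theorem main_eq (L : List (List String)) :
    (PySem.List.pyRange 0 (PySem.List.len L) 1).flatMap (fun x =>
      (PySem.List.pyRange 0 (PySem.List.len (PySem.List.pyGetD L x [])) 1).map
        (fun y => makePaddedParagraph [x, y] L)) =
    (PySem.List.enumerate L).flatMap (fun p =>
      (PySem.List.enumerate p.2).map (fun q =>
        PySem.Str.join "\n"
          (PySem.List.slice ((L.map (fun line => line.map blankWord)).map
              (fun b => PySem.Str.join " " b)) none (some p.1) ++
            [PySem.Str.join " "
              (PySem.List.slice (PySem.List.pyGetD (L.map (fun line => line.map blankWord)) p.1 []) none (some q.1) ++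
                [q.2] ++
                PySem.List.slice (PySem.List.pyGetD (L.map (fun line => line.map blankWord)) p.1 []) (some (q.1 + 1)) none)] ++
            PySem.List.slice ((L.map (fun line => line.map blankWord)).map
              (fun b => PySem.Str.join " " b)) (some (p.1 + 1)) none))) := by
  rw [PySem.List.enumerate_eq_map_pyRange L [], List.flatMap_map]
  simp only [PySem.List.len_eq]
  rw [pyRange_zero_nat L.length, List.flatMap_map, List.flatMap_map]
  apply List.flatMap_congr
  intro k hk
  rw [List.mem_range] at hk
  simp only [PySem.List.pyGetD_natCast]
  rw [PySem.List.enumerate_eq_map_pyRange (L.getD k []) "", List.map_map]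
  simp only [PySem.List.len_eq]
  rw [pyRange_zero_nat, List.map_map, List.map_map]
  apply List.map_congr_left
  intro j hj
  rw [List.mem_range] at hj
  simp only [Function.comp_apply, PySem.List.pyGetD_natCast, PySem.List.slice_to_natCast]
  rw [show ((j : Int) + 1) = ((j + 1 : Nat) : Int) from by push_cast; ring,
    show ((k : Int) + 1) = ((k + 1 : Nat) : Int) from by push_cast; ring,
    PySem.List.slice_from_natCast, PySem.List.slice_from_natCast]
  rw [show (L.map (fun line => line.map blankWord)).getD k [] = (L.getD k []).map blankWord from by
    rw [List.getD_eq_getElem _ _ (by simpa), List.getD_eq_getElem _ _ hk, List.getElem_map]]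
  rw [point_eq L k j hk hj]
  simp [List.map_map, Function.comp_def]

-- ===== VERDICT (by name: the statement is the Claim_ definition above) =====
theorem paragraphDivider_spec : Claim_equal_paragraphDivider := by
  intro text _
  unfold Spec_paragraphDivider paragraphDivider paragraphDivider_alt
  simp only [PySem.List.foldl_append_singleton_eq_map, List.nil_append]
  simp only [PySem.List.foldl_append_eq_flatMap, List.nil_append]
  exact main_eq _
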